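-- pv_equiv track=rewrite | github.com/zion96/python_summer2022 | Day1/ClassExercise/day01_exercise_sol_ap.py | uses_only
-- ===== SOURCE A (Python) =====
-- def uses_only(word1, word2):
--     allTs = []
--     for i in range(0, len(word1)):
--         if word1[i] in word2:
--             allTs.append(True)
--         else:
--             allTs.append(False)
--     return(all(allTs) == True)
-- ===== SOURCE B (Python) =====
-- def uses_only(word1, word2):
--     # sort-then-merge: sorted distinct chars of each word, one two-pointer scan
--     a = sorted(set(word1))
--     b = sorted(set(word2))
--     j = 0
--     for c in a:
--         while j < len(b) and b[j] < c:
--             j += 1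
--         if j == len(b) or b[j] != c:
--             return False
--     return True
-- ===== Notes on version B (the rewrite author's own statement) =====
-- stated objective: faster
-- what changed: Replaces the per-character membership loop with a sort-then-merge algorithm: the distinct characters of each word are sorted and a single two-pointer merge scan over the two ordered sequences decides containment, using order comparisons instead of repeated membership scans of word2.
import Mathlib
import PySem

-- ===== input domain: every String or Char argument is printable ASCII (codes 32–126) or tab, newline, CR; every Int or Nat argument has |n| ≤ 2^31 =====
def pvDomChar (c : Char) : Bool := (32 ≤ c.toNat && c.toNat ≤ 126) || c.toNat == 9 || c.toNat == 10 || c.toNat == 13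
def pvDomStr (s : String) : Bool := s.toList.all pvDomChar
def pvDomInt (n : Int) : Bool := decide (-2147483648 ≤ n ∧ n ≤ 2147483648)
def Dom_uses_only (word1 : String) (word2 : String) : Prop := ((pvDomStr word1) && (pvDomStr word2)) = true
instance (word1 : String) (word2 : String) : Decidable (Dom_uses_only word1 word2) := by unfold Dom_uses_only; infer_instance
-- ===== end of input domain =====

-- B replaces A's per-character membership loop by sort-then-merge: sorted distinct chars of each word, one two-pointer merge scan.

-- ===== PORT A =====
-- loop over range(0, len(word1)); word1[i] (always in range here) checked for membership in word2
def uses_only (word1 : String) (word2 : String) : Bool :=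
  let allTs : List Bool :=
    (PySem.List.pyRange 0 word1.toList.length 1).foldl
      (fun acc i =>
        if PySem.List.pyGetD word1.toList i ' ' ∈ word2.toList then acc ++ [true]
        else acc ++ [false]) []
  (allTs.all id) == true

-- ===== PORT B =====
-- the for/while two-pointer loop of Source B: advance in b while b[j] < c, then demand b[j] = c
def mergeScan : List Char → List Char → Bool
  | [], _ => true
  | _ :: _, [] => false
  | c :: cs, d :: ds =>
    if d < c then mergeScan (c :: cs) ds
    else if d ≠ c then false
    else mergeScan cs (d :: ds)
termination_by a b => a.length + b.length

def uses_only_alt (word1 : String) (word2 : String) : Bool :=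
  mergeScan (PySem.List.sorted (PySem.Set.ofList word1.toList) (fun x => x) false)
            (PySem.List.sorted (PySem.Set.ofList word2.toList) (fun x => x) false)

-- ===== PRECONDITION & SPEC =====
def Spec_uses_only (word1 : String) (word2 : String) (out : Bool) : Prop := out = uses_only_alt word1 word2
instance (word1 : String) (word2 : String) (out : Bool) : Decidable (Spec_uses_only word1 word2 out) := by unfold Spec_uses_only; infer_instance

-- ===== CLAIM =====
def Claim_equal_uses_only : Prop := ∀ (word1 : String) (word2 : String), Dom_uses_only word1 word2 → Spec_uses_only word1 word2 (uses_only word1 word2)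

-- ===== LEMMAS AND PROOFS =====

-- A's accumulated list is the map of the membership test over the index range
theorem usesOnly_allTs_eq_map (cs ds : List Char) :
    (PySem.List.pyRange 0 cs.length 1).foldl
      (fun acc i => if PySem.List.pyGetD cs i ' ' ∈ ds then acc ++ [true] else acc ++ [false]) []
    = (PySem.List.pyRange 0 cs.length 1).map (fun i => decide (PySem.List.pyGetD cs i ' ' ∈ ds)) := by
  have h : ∀ (acc : List Bool) (i : Int),
      (if PySem.List.pyGetD cs i ' ' ∈ ds then acc ++ [true] else acc ++ [false])
      = acc ++ [decide (PySem.List.pyGetD cs i ' ' ∈ ds)] := by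
    intro acc i; split_ifs with h <;> simp [h]
  simp only [h]
  simpa using PySem.List.foldl_append_singleton_eq_map
    (fun i => decide (PySem.List.pyGetD cs i ' ' ∈ ds)) (PySem.List.pyRange 0 cs.length 1) []

theorem usesOnly_A_true_iff (cs ds : List Char) :
    (((PySem.List.pyRange 0 cs.length 1).foldl
      (fun acc i => if PySem.List.pyGetD cs i ' ' ∈ ds then acc ++ [true] else acc ++ [false]) []).all id)
      = true ↔ ∀ c ∈ cs, c ∈ ds := by
  rw [usesOnly_allTs_eq_map]
  simp only [List.all_map, List.all_eq_true, Function.comp,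
    PySem.List.mem_pyRange_one]
  constructor
  · intro h c hc
    obtain ⟨k, hk, rfl⟩ := List.getElem_of_mem hc
    have := h (k : Int) ⟨by positivity, by exact_mod_cast hk⟩
    simpa [PySem.List.pyGetD_natCast, List.getD, hk] using this
  · intro h i ⟨h0, hi⟩
    have hg := PySem.List.pyGetD_eq_getElem (xs := cs) (i := i) (d := ' ') h0 (by exact_mod_cast hi)
    simp only [id_eq, decide_eq_true_eq, hg]
    exact h _ (List.getElem_mem _)

-- on strictly increasing lists the merge scan decides containment
theorem mergeScan_iff (a : List Char) :
    ∀ b : List Char, a.Pairwise (· < ·) → b.Pairwise (· < ·) →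
      (mergeScan a b = true ↔ ∀ c ∈ a, c ∈ b) := by
  induction a with
  | nil => intro b _ _; simp [mergeScan]
  | cons c cs iha =>
    intro b ha hb
    induction b with
    | nil =>
      simp only [mergeScan, Bool.false_eq_true, false_iff]
      exact fun h => List.not_mem_nil (h c List.mem_cons_self)
    | cons d ds ihb =>
      rw [List.pairwise_cons] at hb
      by_cases hdc : d < c
      · -- d < c: every element of c::cs exceeds d, so d is irrelevant
        have hne : ∀ x ∈ c :: cs, x ≠ d := by
          intro x hx
          rcases List.mem_cons.mp hx with rfl | hx'
          · exact ne_of_gt hdc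
          · have : c < x := (List.pairwise_cons.mp ha).1 x hx'
            exact ne_of_gt (lt_trans hdc this)
        rw [mergeScan, if_pos hdc, ihb hb.2]
        constructor
        · intro h x hx; exact List.mem_cons_of_mem d (h x hx)
        · intro h x hx
          rcases List.mem_cons.mp (h x hx) with rfl | h'
          · exact absurd rfl (hne x hx)
          · exact h'
      · by_cases hne : d = c
        · subst hne
          rw [mergeScan, if_neg hdc, if_neg (not_ne_iff.mpr rfl)]
          rw [iha (d :: ds) (List.pairwise_cons.mp ha).2 (List.pairwise_cons.mpr hb)]
          constructor
          · intro h x hx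
            rcases List.mem_cons.mp hx with rfl | hx'
            · exact List.mem_cons_self
            · exact h x hx'
          · intro h x hx; exact h x (List.mem_cons_of_mem d hx)
        · -- c < d: c cannot occur in d::ds
          have hcd : c < d := lt_of_le_of_ne (not_lt.mp hdc) (Ne.symm hne)
          rw [mergeScan, if_neg hdc, if_pos (fun h => hne h)]
          simp only [Bool.false_eq_true, false_iff]
          intro h
          have hc := h c List.mem_cons_self
          rcases List.mem_cons.mp hc with rfl | hc'
          · exact hne rfl
          · exact absurd (hb.1 c hc') (not_lt.mpr (le_of_lt hcd))
  termination_by b => b.length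

theorem usesOnly_B_true_iff (w1 w2 : String) :
    uses_only_alt w1 w2 = true ↔ ∀ c ∈ w1.toList, c ∈ w2.toList := by
  unfold uses_only_alt
  rw [mergeScan_iff _ _ (PySem.List.sorted_ofList_pairwise_lt _)
      (PySem.List.sorted_ofList_pairwise_lt _)]
  simp [PySem.List.mem_sorted, PySem.Set.mem_ofList]

-- ===== VERDICT =====
theorem uses_only_spec : Claim_equal_uses_only := by
  intro word1 word2 _
  unfold Spec_uses_only uses_only
  rw [Bool.eq_iff_iff]
  simp only [beq_iff_eq]
  rw [usesOnly_A_true_iff, usesOnly_B_true_iff]
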